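-- pv_equiv track=rewrite | github.com/sueszli/vector-database-benchmark | dataset/python-mutated/Pack-ProblemVariants.py | zeroOnePackMaxProfitNumbers2
-- ===== SOURCE A (Python) =====
-- def zeroOnePackMaxProfitNumbers2(weight: [int], value: [int], W: int):
--     if False:
--         i = 10
--         return i + 15
--     size = len(weight)
--     dp = [0 for _ in range(W + 1)]
--     op = [1 for _ in range(W + 1)]
--     for i in range(1, size + 1):
--         for w in range(W, weight[i - 1] - 1, -1):
--             if dp[w] < dp[w - weight[i - 1]] + value[i - 1]:
--                 dp[w] = dp[w - weight[i - 1]] + value[i - 1]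
--                 op[w] = op[w - weight[i - 1]]
--             elif dp[w] == dp[w - weight[i - 1]] + value[i - 1]:
--                 op[w] = op[w] + op[w - weight[i - 1]]
--     return op[W]
-- ===== SOURCE B (Python) =====
-- def zeroOnePackMaxProfitNumbers2(weight, value, W):
--     n = len(weight)
--     # phase 1 (top-down plan): which capacities can ever be queried at each item level.
--     # cur ends as the needed-set for level 0; deltas[k] = capacities first needed at level n-1-k.
--     cur = {W}
--     deltas = []
--     for i in range(n, 0, -1):
--         wt = weight[i - 1]
--         new = {w - wt for w in cur if wt <= w} - cur
--         deltas.append(new)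
--         cur |= new
--     # phase 2 (bottom-up evaluation): (best value, #subsets attaining it) per needed capacity only.
--     table = {w: (0, 1) for w in cur}
--     for i in range(1, n + 1):
--         cur -= deltas[n - i]
--         wt = weight[i - 1]
--         nxt = {}
--         for w in cur:
--             skip = table[w]
--             if wt <= w:
--                 bv, bc = table[w - wt]
--                 tv = bv + value[i - 1]
--                 if tv > skip[0]:
--                     nxt[w] = (tv, bc)
--                 elif tv == skip[0]:
--                     nxt[w] = (skip[0], skip[1] + bc)
--                 else:
--                     nxt[w] = skip
--             else:
--                 nxt[w] = skip
--         table = nxt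
--     return table[W][1]
-- ===== Notes on version B (the rewrite author's own statement) =====
-- stated objective: alternative
-- what changed: Replaced A's dense in-place reverse-scan DP array over all capacities 0..W by a sparse reachable-state DP: a top-down planning pass computes, per item level, the set of capacities that can ever be queried, then a bottom-up pass evaluates (best value, count) dicts only on those capacities.
import Mathlib
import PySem

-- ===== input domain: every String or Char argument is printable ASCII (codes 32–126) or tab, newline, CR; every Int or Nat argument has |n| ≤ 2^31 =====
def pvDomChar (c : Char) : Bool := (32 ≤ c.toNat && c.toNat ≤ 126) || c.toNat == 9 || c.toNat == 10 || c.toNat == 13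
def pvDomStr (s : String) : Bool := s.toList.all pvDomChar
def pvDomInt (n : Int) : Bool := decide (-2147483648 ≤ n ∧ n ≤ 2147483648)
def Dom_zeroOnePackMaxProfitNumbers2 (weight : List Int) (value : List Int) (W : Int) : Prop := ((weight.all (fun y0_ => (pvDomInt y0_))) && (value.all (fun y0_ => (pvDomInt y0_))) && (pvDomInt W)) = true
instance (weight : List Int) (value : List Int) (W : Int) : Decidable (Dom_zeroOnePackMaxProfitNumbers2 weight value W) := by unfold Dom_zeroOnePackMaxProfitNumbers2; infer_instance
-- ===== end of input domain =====

-- B replaces A's dense in-place reverse-scan DP array over capacities 0..W by a sparse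
-- reachable-state DP: a top-down planning pass computes, per item level, the set of capacities
-- that can ever be queried, then a bottom-up pass evaluates (best value, count) dicts only on
-- those capacities; objective: alternative algorithm, no speed claim.

-- ===== PORT A =====
-- inner loop body of A: the in-place update of (dp, op) at index w
def pvInnerA (wt v : Int) (st : List Int × List Int) (w : Int) : List Int × List Int :=
  if PySem.List.pyGetD st.1 w 0 < PySem.List.pyGetD st.1 (w - wt) 0 + v then
    (PySem.List.pySetD st.1 w (PySem.List.pyGetD st.1 (w - wt) 0 + v),
     PySem.List.pySetD st.2 w (PySem.List.pyGetD st.2 (w - wt) 0))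
  else if PySem.List.pyGetD st.1 w 0 = PySem.List.pyGetD st.1 (w - wt) 0 + v then
    (st.1, PySem.List.pySetD st.2 w (PySem.List.pyGetD st.2 w 0 + PySem.List.pyGetD st.2 (w - wt) 0))
  else st

def zeroOnePackMaxProfitNumbers2 (weight : List Int) (value : List Int) (W : Int) : Int :=
  let size : Int := (weight.length : Int)
  let dp : List Int := (PySem.List.pyRange 0 (W + 1) 1).map (fun _ => (0 : Int))
  let op : List Int := (PySem.List.pyRange 0 (W + 1) 1).map (fun _ => (1 : Int))
  let st := (PySem.List.pyRange 1 (size + 1) 1).foldl (fun st i =>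
      (PySem.List.pyRange W (PySem.List.pyGetD weight (i - 1) 0 - 1) (-1)).foldl
        (pvInnerA (PySem.List.pyGetD weight (i - 1) 0) (PySem.List.pyGetD value (i - 1) 0)) st)
    (dp, op)
  PySem.List.pyGetD st.2 W 0

-- ===== PORT B =====
-- B-side helpers: the phase-1 planning step, the per-cell evaluation, the phase-2 step.
def pvPh1Step (weight : List Int) (st : PySem.Set Int × List (PySem.Set Int)) (i : Int) :
    PySem.Set Int × List (PySem.Set Int) :=
  let wt := PySem.List.pyGetD weight (i - 1) 0
  let nw := PySem.Set.diff
    (PySem.Set.ofList ((st.1.filter (fun w => decide (wt ≤ w))).map (fun w => w - wt))) st.1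
  (PySem.Set.union st.1 nw, st.2 ++ [nw])

-- table[w] / table[w - wt] ported as getD: under Pre_ (in fact for every input) the key is
-- always present, so Python's KeyError is unreachable (proved via the pvK membership lemmas).
def pvCell (table : PySem.Dict Int (Int × Int)) (wt : Int) (value : List Int) (idx w : Int) : Int × Int :=
  let skip := table.getD w (0, 0)
  if wt ≤ w then
    let t := table.getD (w - wt) (0, 0)
    if t.1 + PySem.List.pyGetD value idx 0 > skip.1 then (t.1 + PySem.List.pyGetD value idx 0, t.2)
    else if t.1 + PySem.List.pyGetD value idx 0 = skip.1 then (skip.1, skip.2 + t.2)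
    else skip
  else skip

def pvPh2Step (weight value : List Int) (deltas : List (PySem.Set Int)) (n : Int)
    (st : PySem.Set Int × PySem.Dict Int (Int × Int)) (i : Int) :
    PySem.Set Int × PySem.Dict Int (Int × Int) :=
  let cur := PySem.Set.diff st.1 (PySem.List.pyGetD deltas (n - i) [])
  let wt := PySem.List.pyGetD weight (i - 1) 0
  (cur, cur.foldl (fun d w => d.insert w (pvCell st.2 wt value (i - 1) w)) PySem.Dict.empty)

def zeroOnePackMaxProfitNumbers2_alt (weight : List Int) (value : List Int) (W : Int) : Int :=
  let n : Int := (weight.length : Int)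
  let p1 := (PySem.List.pyRange n 0 (-1)).foldl (pvPh1Step weight)
    (PySem.Set.ofList [W], ([] : List (PySem.Set Int)))
  let table0 : PySem.Dict Int (Int × Int) :=
    p1.1.foldl (fun d w => d.insert w ((0 : Int), (1 : Int))) PySem.Dict.empty
  let st2 := (PySem.List.pyRange 1 (n + 1) 1).foldl (pvPh2Step weight value p1.2 n) (p1.1, table0)
  (st2.2.getD W (0, 0)).2

-- ===== PRECONDITION & SPEC =====
-- Pre_ is exactly where the Python A returns: W ≥ 0 (else op[W] is an IndexError on the empty
-- list), all weights ≥ 0 (a negative weight makes dp[w-weight] an IndexError), and value is long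
-- enough for every item light enough to be processed (else value[i-1] is an IndexError).
def Pre_zeroOnePackMaxProfitNumbers2 (weight : List Int) (value : List Int) (W : Int) : Prop :=
  0 ≤ W ∧ (∀ x ∈ weight, 0 ≤ x) ∧
    (∀ i ∈ List.range weight.length, PySem.List.pyGetD weight (i : Int) 0 ≤ W → i < value.length)
instance (weight : List Int) (value : List Int) (W : Int) : Decidable (Pre_zeroOnePackMaxProfitNumbers2 weight value W) := by unfold Pre_zeroOnePackMaxProfitNumbers2; infer_instance

def pvWitness_zeroOnePackMaxProfitNumbers2 : List Int × List Int × Int := ([1, 2], [3, 4], 5)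

def Spec_zeroOnePackMaxProfitNumbers2 (weight : List Int) (value : List Int) (W : Int) (out : Int) : Prop := out = zeroOnePackMaxProfitNumbers2_alt weight value W
instance (weight : List Int) (value : List Int) (W : Int) (out : Int) : Decidable (Spec_zeroOnePackMaxProfitNumbers2 weight value W out) := by unfold Spec_zeroOnePackMaxProfitNumbers2; infer_instance

-- ===== CLAIM (what is proved, stated in full; the proofs are below) =====
def Claim_equal_zeroOnePackMaxProfitNumbers2 : Prop := ∀ (weight : List Int) (value : List Int) (W : Int), Dom_zeroOnePackMaxProfitNumbers2 weight value W → Pre_zeroOnePackMaxProfitNumbers2 weight value W → Spec_zeroOnePackMaxProfitNumbers2 weight value W (zeroOnePackMaxProfitNumbers2 weight value W)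

-- ===== LEMMAS AND PROOFS =====

-- the pure level recurrence both programs compute: pvG i w = (best value, count) for the
-- first i items at capacity w
def pvG (weight value : List Int) : Nat → Int → Int × Int
  | 0, _ => (0, 1)
  | i+1, w =>
    let wt := PySem.List.pyGetD weight (i : Int) 0
    let v := PySem.List.pyGetD value (i : Int) 0
    let skip := pvG weight value i w
    if wt ≤ w then
      let t := pvG weight value i (w - wt)
      if t.1 + v > skip.1 then (t.1 + v, t.2)
      else if t.1 + v = skip.1 then (skip.1, skip.2 + t.2)
      else skip
    else skip

-- ---- A side: A's in-place pass equals a fresh-row pass, rows equal pvG ----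

def pvStepB (dp op : List Int) (wt v w : Int) : Int × Int :=
  if w < wt then (PySem.List.pyGetD dp w 0, PySem.List.pyGetD op w 0)
  else
    let cand := PySem.List.pyGetD dp (w - wt) 0 + v
    if cand > PySem.List.pyGetD dp w 0 then (cand, PySem.List.pyGetD op (w - wt) 0)
    else if cand = PySem.List.pyGetD dp w 0 then
      (PySem.List.pyGetD dp w 0, PySem.List.pyGetD op w 0 + PySem.List.pyGetD op (w - wt) 0)
    else (PySem.List.pyGetD dp w 0, PySem.List.pyGetD op w 0)

def pvBodyA (weight value : List Int) (W : Int) (st : List Int × List Int) (k : Nat) : List Int × List Int :=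
  (PySem.List.pyRange W (PySem.List.pyGetD weight (k : Int) 0 - 1) (-1)).foldl
    (pvInnerA (PySem.List.pyGetD weight (k : Int) 0) (PySem.List.pyGetD value (k : Int) 0)) st

def pvBodyB (weight value : List Int) (W : Int) (st : List Int × List Int) (k : Nat) : List Int × List Int :=
  if PySem.List.pyGetD weight (k : Int) 0 > W then st else
    (((PySem.List.pyRange 0 (W + 1) 1).map
        (fun w => pvStepB st.1 st.2 (PySem.List.pyGetD weight (k : Int) 0) (PySem.List.pyGetD value (k : Int) 0) w)).map Prod.fst,
     ((PySem.List.pyRange 0 (W + 1) 1).map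
        (fun w => pvStepB st.1 st.2 (PySem.List.pyGetD weight (k : Int) 0) (PySem.List.pyGetD value (k : Int) 0) w)).map Prod.snd)

lemma portA_eq (weight value : List Int) (W : Int) :
    zeroOnePackMaxProfitNumbers2 weight value W =
      PySem.List.pyGetD ((List.range weight.length).foldl (pvBodyA weight value W)
        ((PySem.List.pyRange 0 (W + 1) 1).map (fun _ => (0 : Int)),
         (PySem.List.pyRange 0 (W + 1) 1).map (fun _ => (1 : Int)))).2 W 0 := by
  unfold zeroOnePackMaxProfitNumbers2 pvBodyA
  dsimp only
  rw [PySem.List.pyRange_one 1 ((weight.length : Int) + 1)]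
  simp only [add_sub_cancel_right, Int.toNat_natCast, List.foldl_map, add_sub_cancel_left]

lemma pyGetD_pySetD_int (xs : List Int) (i j v d : Int) (h0 : 0 ≤ i)
    (hlt : i < (xs.length : Int)) (hj : 0 ≤ j) :
    PySem.List.pyGetD (PySem.List.pySetD xs i v) j d =
      if j = i then v else PySem.List.pyGetD xs j d := by
  have hi : i = ((i.toNat : Nat) : Int) := (Int.toNat_of_nonneg h0).symm
  have hjj : j = ((j.toNat : Nat) : Int) := (Int.toNat_of_nonneg hj).symm
  rw [hi, hjj, PySem.List.pyGetD_pySetD_natCast xs i.toNat j.toNat v d (by omega)]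
  by_cases h : j.toNat = i.toNat
  · rw [if_pos h, if_pos (by omega)]
  · rw [if_neg h, if_neg (by omega)]

-- descending in-place pass of A computes the fresh row, pointwise
lemma descendA (W wt v : Int) (hwt : 0 ≤ wt) (hW : 0 ≤ W) :
    ∀ (m : Nat) (dp op dp0 op0 : List Int),
      dp.length = (W + 1).toNat → op.length = (W + 1).toNat →
      dp0.length = (W + 1).toNat → op0.length = (W + 1).toNat →
      wt - 1 + m ≤ W →
      (∀ j : Int, 0 ≤ j → j ≤ wt - 1 + m →
        PySem.List.pyGetD dp j 0 = PySem.List.pyGetD dp0 j 0 ∧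
        PySem.List.pyGetD op j 0 = PySem.List.pyGetD op0 j 0) →
      (∀ j : Int, wt - 1 + m < j → j ≤ W →
        PySem.List.pyGetD dp j 0 = (pvStepB dp0 op0 wt v j).1 ∧
        PySem.List.pyGetD op j 0 = (pvStepB dp0 op0 wt v j).2) →
      (∀ j : Int, 0 ≤ j → j ≤ W →
        PySem.List.pyGetD ((PySem.List.pyRange (wt - 1 + m) (wt - 1) (-1)).foldl (pvInnerA wt v) (dp, op)).1 j 0 = (pvStepB dp0 op0 wt v j).1 ∧
        PySem.List.pyGetD ((PySem.List.pyRange (wt - 1 + m) (wt - 1) (-1)).foldl (pvInnerA wt v) (dp, op)).2 j 0 = (pvStepB dp0 op0 wt v j).2) ∧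
      ((PySem.List.pyRange (wt - 1 + m) (wt - 1) (-1)).foldl (pvInnerA wt v) (dp, op)).1.length = (W + 1).toNat ∧
      ((PySem.List.pyRange (wt - 1 + m) (wt - 1) (-1)).foldl (pvInnerA wt v) (dp, op)).2.length = (W + 1).toNat := by
  intro m
  induction m with
  | zero =>
    intro dp op dp0 op0 hdl hol hd0 ho0 hle hlow hhigh
    simp only [Nat.cast_zero, add_zero] at *
    rw [PySem.List.pyRange_neg_one_eq_nil (le_refl _)]
    simp only [List.foldl_nil]
    refine ⟨?_, hdl, hol⟩
    intro j h0 hjW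
    by_cases hj : j ≤ wt - 1
    · have hs : pvStepB dp0 op0 wt v j =
          (PySem.List.pyGetD dp0 j 0, PySem.List.pyGetD op0 j 0) := by
        unfold pvStepB; rw [if_pos (by omega)]
      rw [hs]
      exact hlow j h0 hj
    · exact hhigh j (by omega) hjW
  | succ m ih =>
    intro dp op dp0 op0 hdl hol hd0 ho0 hle hlow hhigh
    have hcast : (((m + 1 : Nat)) : Int) = (m : Int) + 1 := by push_cast; ring
    rw [hcast] at hle hlow hhigh ⊢
    have hcons : PySem.List.pyRange (wt - 1 + ((m : Int) + 1)) (wt - 1) (-1) =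
        (wt + (m : Int)) :: PySem.List.pyRange (wt - 1 + (m : Int)) (wt - 1) (-1) := by
      rw [show wt - 1 + ((m : Int) + 1) = wt + (m : Int) from by ring,
          PySem.List.pyRange_neg_one_cons (by omega)]
      congr 1
      ring_nf
    rw [hcons, List.foldl_cons]
    set a : Int := wt + (m : Int) with ha
    have h0a : (0 : Int) ≤ a := by omega
    have haW : a ≤ W := by omega
    have hdpa := (hlow a (by omega) (by omega)).1
    have hopa := (hlow a (by omega) (by omega)).2
    have hdpw := (hlow (a - wt) (by omega) (by omega)).1
    have hopw := (hlow (a - wt) (by omega) (by omega)).2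
    have hnlt : ¬ a < wt := by omega
    have hres : pvInnerA wt v (dp, op) a =
        if PySem.List.pyGetD dp0 a 0 < PySem.List.pyGetD dp0 (a - wt) 0 + v then
          (PySem.List.pySetD dp a (PySem.List.pyGetD dp0 (a - wt) 0 + v),
           PySem.List.pySetD op a (PySem.List.pyGetD op0 (a - wt) 0))
        else if PySem.List.pyGetD dp0 a 0 = PySem.List.pyGetD dp0 (a - wt) 0 + v then
          (dp, PySem.List.pySetD op a (PySem.List.pyGetD op0 a 0 + PySem.List.pyGetD op0 (a - wt) 0))
        else (dp, op) := by
      unfold pvInnerA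
      dsimp only
      rw [hdpa, hdpw, hopa, hopw]
    rw [hres]
    split_ifs with c1 c2
    · have hsa : pvStepB dp0 op0 wt v a =
          (PySem.List.pyGetD dp0 (a - wt) 0 + v, PySem.List.pyGetD op0 (a - wt) 0) := by
        unfold pvStepB
        rw [if_neg hnlt]
        dsimp only
        rw [if_pos (by exact c1)]
      refine ih _ _ dp0 op0 (by rw [PySem.List.length_pySetD]; exact hdl)
        (by rw [PySem.List.length_pySetD]; exact hol) hd0 ho0 (by omega) ?_ ?_
      · intro j h0 hj
        rw [pyGetD_pySetD_int dp a j _ 0 h0a (by omega) h0,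
            pyGetD_pySetD_int op a j _ 0 h0a (by omega) h0,
            if_neg (by omega), if_neg (by omega)]
        exact hlow j h0 (by omega)
      · intro j hj hjW
        rw [pyGetD_pySetD_int dp a j _ 0 h0a (by omega) (by omega),
            pyGetD_pySetD_int op a j _ 0 h0a (by omega) (by omega)]
        by_cases hja : j = a
        · rw [if_pos hja, if_pos hja, hja, hsa]
          exact ⟨rfl, rfl⟩
        · rw [if_neg hja, if_neg hja]
          exact hhigh j (by omega) hjW
    · have hsa : pvStepB dp0 op0 wt v a =
          (PySem.List.pyGetD dp0 a 0,
           PySem.List.pyGetD op0 a 0 + PySem.List.pyGetD op0 (a - wt) 0) := by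
        unfold pvStepB
        rw [if_neg hnlt]
        dsimp only
        rw [if_neg (by omega), if_pos c2.symm]
      refine ih _ _ dp0 op0 hdl (by rw [PySem.List.length_pySetD]; exact hol) hd0 ho0
        (by omega) ?_ ?_
      · intro j h0 hj
        rw [pyGetD_pySetD_int op a j _ 0 h0a (by omega) h0, if_neg (by omega)]
        exact hlow j h0 (by omega)
      · intro j hj hjW
        rw [pyGetD_pySetD_int op a j _ 0 h0a (by omega) (by omega)]
        by_cases hja : j = a
        · rw [if_pos hja, hja, hsa]
          exact ⟨(hlow a (by omega) (by omega)).1, rfl⟩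
        · rw [if_neg hja]
          exact hhigh j (by omega) hjW
    · have hsa : pvStepB dp0 op0 wt v a =
          (PySem.List.pyGetD dp0 a 0, PySem.List.pyGetD op0 a 0) := by
        unfold pvStepB
        rw [if_neg hnlt]
        dsimp only
        rw [if_neg (by omega), if_neg (by omega)]
      refine ih _ _ dp0 op0 hdl hol hd0 ho0 (by omega) ?_ ?_
      · intro j h0 hj
        exact hlow j h0 (by omega)
      · intro j hj hjW
        by_cases hja : j = a
        · rw [hja, hsa]
          exact ⟨(hlow a (by omega) (by omega)).1, (hlow a (by omega) (by omega)).2⟩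
        · exact hhigh j (by omega) hjW

-- for one item that fits (0 ≤ wt ≤ W), A's pass equals the fresh row, as lists
lemma item_eq (W wt v : Int) (hW : 0 ≤ W) (hwt : 0 ≤ wt) (hwtW : wt ≤ W)
    (dp0 op0 : List Int) (hd : dp0.length = (W + 1).toNat) (ho : op0.length = (W + 1).toNat) :
    (PySem.List.pyRange W (wt - 1) (-1)).foldl (pvInnerA wt v) (dp0, op0) =
      (((PySem.List.pyRange 0 (W + 1) 1).map (fun w => pvStepB dp0 op0 wt v w)).map Prod.fst,
       ((PySem.List.pyRange 0 (W + 1) 1).map (fun w => pvStepB dp0 op0 wt v w)).map Prod.snd) := by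
  have hmeq : wt - 1 + (((W - wt + 1).toNat : Nat) : Int) = W := by omega
  obtain ⟨hpt, hl1, hl2⟩ := descendA W wt v hwt hW (W - wt + 1).toNat dp0 op0 dp0 op0 hd ho hd ho
    (by omega) (by intro j _ _; exact ⟨rfl, rfl⟩)
    (by intro j hj hjW; exact absurd hjW (by omega))
  rw [hmeq] at hpt hl1 hl2
  have hlen : ∀ (f : Int × Int → Int),
      (((PySem.List.pyRange 0 (W + 1) 1).map (fun w => pvStepB dp0 op0 wt v w)).map f).length
        = (W + 1).toNat := by
    intro f; simp [PySem.List.length_pyRange_one]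
  have hget : ∀ (f : Int × Int → Int) (k : Nat) (hk : k < (W + 1).toNat),
      (((PySem.List.pyRange 0 (W + 1) 1).map (fun w => pvStepB dp0 op0 wt v w)).map f)[k]'
        (by rw [hlen f]; exact hk) = f (pvStepB dp0 op0 wt v (k : Int)) := by
    intro f k hk
    rw [List.getElem_map, List.getElem_map, PySem.List.getElem_pyRange_one 0 (W + 1) k
      (by simpa [PySem.List.length_pyRange_one] using hk)]
    norm_num
  refine Prod.ext ?_ ?_
  · refine List.ext_getElem (by rw [hl1, hlen Prod.fst]) ?_
    intro k hk1 hk2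
    have hk : k < (W + 1).toNat := by rwa [hl1] at hk1
    rw [hget Prod.fst k hk]
    have := (hpt (k : Int) (by positivity) (by omega)).1
    rw [PySem.List.pyGetD_natCast, List.getD_eq_getElem _ _ hk1] at this
    exact this
  · refine List.ext_getElem (by rw [hl2, hlen Prod.snd]) ?_
    intro k hk1 hk2
    have hk : k < (W + 1).toNat := by rwa [hl2] at hk1
    rw [hget Prod.snd k hk]
    have := (hpt (k : Int) (by positivity) (by omega)).2
    rw [PySem.List.pyGetD_natCast, List.getD_eq_getElem _ _ hk1] at this
    exact this

lemma outer_eq (weight value : List Int) (W : Int) (hW : 0 ≤ W)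
    (hw : ∀ x ∈ weight, 0 ≤ x) :
    ∀ (l : List Nat), (∀ k ∈ l, k < weight.length) →
    ∀ (st : List Int × List Int), st.1.length = (W + 1).toNat → st.2.length = (W + 1).toNat →
      l.foldl (pvBodyA weight value W) st = l.foldl (pvBodyB weight value W) st ∧
      (l.foldl (pvBodyB weight value W) st).1.length = (W + 1).toNat ∧
      (l.foldl (pvBodyB weight value W) st).2.length = (W + 1).toNat := by
  intro l
  induction l with
  | nil => intro _ st h1 h2; exact ⟨rfl, h1, h2⟩
  | cons k l ih =>
    intro hmem st h1 h2
    have hk : k < weight.length := hmem k (List.mem_cons_self)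
    have hwt0 : 0 ≤ PySem.List.pyGetD weight (k : Int) 0 := by
      rw [PySem.List.pyGetD_eq_getElem weight 0 (by positivity) (by exact_mod_cast hk)]
      exact hw _ (List.getElem_mem _)
    rw [List.foldl_cons, List.foldl_cons]
    by_cases hcase : PySem.List.pyGetD weight (k : Int) 0 > W
    · have hA : pvBodyA weight value W st k = st := by
        unfold pvBodyA
        rw [PySem.List.pyRange_neg_one_eq_nil (by omega)]
        rfl
      have hB : pvBodyB weight value W st k = st := by
        unfold pvBodyB; rw [if_pos hcase]
      rw [hA, hB]
      exact ih (fun x hx => hmem x (List.mem_cons_of_mem _ hx)) st h1 h2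
    · replace hcase : PySem.List.pyGetD weight (k : Int) 0 ≤ W := le_of_not_gt hcase
      have hAB : pvBodyA weight value W st k = pvBodyB weight value W st k := by
        unfold pvBodyA pvBodyB
        rw [if_neg (by omega)]
        have := item_eq W (PySem.List.pyGetD weight (k : Int) 0) (PySem.List.pyGetD value (k : Int) 0)
          hW hwt0 hcase st.1 st.2 h1 h2
        simpa using this
      have hBlen1 : (pvBodyB weight value W st k).1.length = (W + 1).toNat := by
        unfold pvBodyB
        split_ifs with h
        · exact h1
        · simp [PySem.List.length_pyRange_one]
      have hBlen2 : (pvBodyB weight value W st k).2.length = (W + 1).toNat := by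
        unfold pvBodyB
        split_ifs with h
        · exact h2
        · simp [PySem.List.length_pyRange_one]
      rw [hAB]
      exact ih (fun x hx => hmem x (List.mem_cons_of_mem _ hx)) _ hBlen1 hBlen2

-- reading one cell of a fresh row
lemma pyGetD_map_pyRange_one (f : Int → Int) (b w : Int) (h0 : 0 ≤ w) (hwb : w < b) :
    PySem.List.pyGetD ((PySem.List.pyRange 0 b 1).map f) w 0 = f w := by
  have hk : w = ((w.toNat : Nat) : Int) := by omega
  have hlt : w.toNat < ((PySem.List.pyRange 0 b 1).map f).length := by
    simp [PySem.List.length_pyRange_one]; omega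
  rw [hk, PySem.List.pyGetD_natCast, List.getD_eq_getElem _ _ hlt, List.getElem_map,
    PySem.List.getElem_pyRange_one 0 b w.toNat (by simpa [PySem.List.length_pyRange_one] using hlt)]
  norm_num

-- the fresh-row iteration computes pvG, pointwise
lemma rowsG (weight value : List Int) (W : Int) (hw : ∀ x ∈ weight, 0 ≤ x) :
    ∀ i : Nat, i ≤ weight.length →
      ((List.range i).foldl (pvBodyB weight value W)
          ((PySem.List.pyRange 0 (W + 1) 1).map (fun _ => (0 : Int)),
           (PySem.List.pyRange 0 (W + 1) 1).map (fun _ => (1 : Int)))).1.length = (W + 1).toNat ∧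
      ((List.range i).foldl (pvBodyB weight value W)
          ((PySem.List.pyRange 0 (W + 1) 1).map (fun _ => (0 : Int)),
           (PySem.List.pyRange 0 (W + 1) 1).map (fun _ => (1 : Int)))).2.length = (W + 1).toNat ∧
      ∀ w : Int, 0 ≤ w → w ≤ W →
        PySem.List.pyGetD ((List.range i).foldl (pvBodyB weight value W)
          ((PySem.List.pyRange 0 (W + 1) 1).map (fun _ => (0 : Int)),
           (PySem.List.pyRange 0 (W + 1) 1).map (fun _ => (1 : Int)))).1 w 0 = (pvG weight value i w).1 ∧
        PySem.List.pyGetD ((List.range i).foldl (pvBodyB weight value W)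
          ((PySem.List.pyRange 0 (W + 1) 1).map (fun _ => (0 : Int)),
           (PySem.List.pyRange 0 (W + 1) 1).map (fun _ => (1 : Int)))).2 w 0 = (pvG weight value i w).2 := by
  intro i
  induction i with
  | zero =>
    intro _
    refine ⟨by simp [PySem.List.length_pyRange_one], by simp [PySem.List.length_pyRange_one], ?_⟩
    intro w h0 hwW
    simp only [List.range_zero, List.foldl_nil]
    constructor
    · rw [pyGetD_map_pyRange_one (fun _ => (0 : Int)) (W + 1) w h0 (by omega)]; rfl
    · rw [pyGetD_map_pyRange_one (fun _ => (1 : Int)) (W + 1) w h0 (by omega)]; rfl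
  | succ i ih =>
    intro hle
    obtain ⟨hl1, hl2, hpt⟩ := ih (by omega)
    simp only [List.range_succ, List.foldl_append, List.foldl_cons, List.foldl_nil] at *
    set st := (List.range i).foldl (pvBodyB weight value W)
      ((PySem.List.pyRange 0 (W + 1) 1).map (fun _ => (0 : Int)),
       (PySem.List.pyRange 0 (W + 1) 1).map (fun _ => (1 : Int))) with hst
    have hiw : i < weight.length := by omega
    have hwt0 : 0 ≤ PySem.List.pyGetD weight (i : Int) 0 := by
      rw [PySem.List.pyGetD_eq_getElem weight 0 (by positivity) (by exact_mod_cast hiw)]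
      exact hw _ (List.getElem_mem _)
    by_cases hbig : PySem.List.pyGetD weight (i : Int) 0 > W
    · have hB : pvBodyB weight value W st i = st := by
        unfold pvBodyB; rw [if_pos hbig]
      rw [hB]
      refine ⟨hl1, hl2, ?_⟩
      intro w h0 hwW
      have hG : pvG weight value (i + 1) w = pvG weight value i w := by
        rw [pvG]
        dsimp only
        rw [if_neg (by omega)]
      rw [hG]
      exact hpt w h0 hwW
    · have hnot : ¬ PySem.List.pyGetD weight (i : Int) 0 > W := hbig
      have hB : pvBodyB weight value W st i =
          (((PySem.List.pyRange 0 (W + 1) 1).map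
              (fun w => pvStepB st.1 st.2 (PySem.List.pyGetD weight (i : Int) 0)
                (PySem.List.pyGetD value (i : Int) 0) w)).map Prod.fst,
           ((PySem.List.pyRange 0 (W + 1) 1).map
              (fun w => pvStepB st.1 st.2 (PySem.List.pyGetD weight (i : Int) 0)
                (PySem.List.pyGetD value (i : Int) 0) w)).map Prod.snd) := by
        unfold pvBodyB; rw [if_neg hnot]
      rw [hB]
      refine ⟨by simp [PySem.List.length_pyRange_one], by simp [PySem.List.length_pyRange_one], ?_⟩
      intro w h0 hwW
      have hcell : pvStepB st.1 st.2 (PySem.List.pyGetD weight (i : Int) 0)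
          (PySem.List.pyGetD value (i : Int) 0) w = pvG weight value (i + 1) w := by
        by_cases hlt : w < PySem.List.pyGetD weight (i : Int) 0
        · unfold pvStepB
          rw [if_pos hlt, (hpt w h0 hwW).1, (hpt w h0 hwW).2]
          rw [pvG]
          dsimp only
          rw [if_neg (by omega)]
        · unfold pvStepB
          rw [if_neg hlt]
          dsimp only
          rw [(hpt w h0 hwW).1, (hpt w h0 hwW).2,
            (hpt (w - PySem.List.pyGetD weight (i : Int) 0) (by omega) (by omega)).1,
            (hpt (w - PySem.List.pyGetD weight (i : Int) 0) (by omega) (by omega)).2]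
          conv_rhs => rw [pvG]
          dsimp only
          rw [if_pos (by omega : PySem.List.pyGetD weight (i : Int) 0 ≤ w)]
      rw [List.map_map, List.map_map]
      constructor
      · rw [pyGetD_map_pyRange_one _ (W + 1) w h0 (by omega)]
        simp only [Function.comp_apply, hcell]
      · rw [pyGetD_map_pyRange_one _ (W + 1) w h0 (by omega)]
        simp only [Function.comp_apply, hcell]

lemma A_eq_G (weight value : List Int) (W : Int) (hW : 0 ≤ W) (hw : ∀ x ∈ weight, 0 ≤ x) :
    zeroOnePackMaxProfitNumbers2 weight value W = (pvG weight value weight.length W).2 := by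
  rw [portA_eq]
  rw [(outer_eq weight value W hW hw (List.range weight.length)
    (by intro k hk; exact List.mem_range.mp hk) _
    (by simp [PySem.List.length_pyRange_one]) (by simp [PySem.List.length_pyRange_one])).1]
  exact ((rowsG weight value W hw weight.length (le_refl _)).2.2 W hW (le_refl W)).2

-- ---- B side: planned needed-capacity sets and sparse evaluation compute pvG ----

-- the weight consulted by phase 1 at planning step j (item level n-j-1)
def pvW1 (weight : List Int) (n j : Nat) : Int :=
  PySem.List.pyGetD weight ((n : Int) - (j : Int) - 1) 0

def pvNewOf (weight : List Int) (n j : Nat) (K : PySem.Set Int) : PySem.Set Int :=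
  PySem.Set.diff
    (PySem.Set.ofList ((K.filter (fun w => decide (pvW1 weight n j ≤ w))).map
      (fun w => w - pvW1 weight n j))) K

-- needed-capacity set after j planning steps (= needed at item level n-j)
def pvK (weight : List Int) (W : Int) (n : Nat) : Nat → PySem.Set Int
  | 0 => PySem.Set.ofList [W]
  | j+1 => PySem.Set.union (pvK weight W n j) (pvNewOf weight n j (pvK weight W n j))

def pvNew (weight : List Int) (W : Int) (n j : Nat) : PySem.Set Int :=
  pvNewOf weight n j (pvK weight W n j)

def pvD (weight : List Int) (W : Int) (n : Nat) : Nat → List (PySem.Set Int)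
  | 0 => []
  | j+1 => pvD weight W n j ++ [pvNew weight W n j]

lemma mem_pvNew (weight : List Int) (n j : Nat) (K : PySem.Set Int) (x : Int) :
    x ∈ pvNewOf weight n j K ↔
      ((∃ u ∈ K, pvW1 weight n j ≤ u ∧ x = u - pvW1 weight n j) ∧ x ∉ K) := by
  unfold pvNewOf
  rw [PySem.Set.mem_diff, PySem.Set.mem_ofList]
  simp only [List.mem_map, List.mem_filter, decide_eq_true_eq]
  constructor
  · rintro ⟨⟨u, ⟨hu, hle⟩, hx⟩, hnot⟩
    exact ⟨⟨u, hu, hle, hx.symm⟩, hnot⟩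
  · rintro ⟨⟨u, hu, hle, hx⟩, hnot⟩
    exact ⟨⟨u, ⟨hu, hle⟩, hx.symm⟩, hnot⟩

lemma mem_pvK_succ (weight : List Int) (W : Int) (n j : Nat) (x : Int) :
    x ∈ pvK weight W n (j+1) ↔
      x ∈ pvK weight W n j ∨ ∃ u ∈ pvK weight W n j, pvW1 weight n j ≤ u ∧ x = u - pvW1 weight n j := by
  show x ∈ PySem.Set.union _ _ ↔ _
  rw [PySem.Set.mem_union, mem_pvNew]
  by_cases h : x ∈ pvK weight W n j
  · simp [h]
  · simp [h]

lemma pvK_mono (weight : List Int) (W : Int) (n j : Nat) (x : Int)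
    (h : x ∈ pvK weight W n j) : x ∈ pvK weight W n (j+1) := by
  rw [mem_pvK_succ]; exact Or.inl h

lemma pvK_shift (weight : List Int) (W : Int) (n j : Nat) (x : Int)
    (h : x ∈ pvK weight W n j) (hle : pvW1 weight n j ≤ x) :
    x - pvW1 weight n j ∈ pvK weight W n (j+1) := by
  rw [mem_pvK_succ]; exact Or.inr ⟨x, h, hle, rfl⟩

lemma pvK_diff_mem (weight : List Int) (W : Int) (n j : Nat) (x : Int) :
    (x ∈ pvK weight W n (j+1) ∧ x ∉ pvNew weight W n j) ↔ x ∈ pvK weight W n j := by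
  have hsucc : x ∈ pvK weight W n (j+1) ↔ x ∈ pvK weight W n j ∨ x ∈ pvNew weight W n j := by
    show x ∈ PySem.Set.union _ _ ↔ _
    rw [PySem.Set.mem_union]
    rfl
  constructor
  · rintro ⟨h1, h2⟩
    rcases hsucc.mp h1 with h | h
    · exact h
    · exact absurd h h2
  · intro h
    refine ⟨hsucc.mpr (Or.inl h), fun hn => ?_⟩
    exact ((mem_pvNew weight n j _ x).mp hn).2 h

lemma pvD_length (weight : List Int) (W : Int) (n : Nat) :
    ∀ j, (pvD weight W n j).length = j := by
  intro j
  induction j with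
  | zero => rfl
  | succ j ih => simp [pvD, ih]

lemma pvD_get (weight : List Int) (W : Int) (n : Nat) :
    ∀ j k : Nat, k < j →
      PySem.List.pyGetD (pvD weight W n j) (k : Int) [] = pvNew weight W n k := by
  intro j k hk
  have hx : (pvD weight W n j)[k]? = some (pvNew weight W n k) := by
    induction j with
    | zero => omega
    | succ j ih =>
      by_cases h : k < j
      · rw [show pvD weight W n (j+1) = pvD weight W n j ++ [pvNew weight W n j] from rfl,
          List.getElem?_append_left (by rw [pvD_length]; exact h)]
        exact ih h
      · have hkj : k = j := by omega
        subst hkj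
        rw [show pvD weight W n (k+1) = pvD weight W n k ++ [pvNew weight W n k] from rfl,
          List.getElem?_append_right (by rw [pvD_length]), pvD_length]
        simp
  rw [PySem.List.pyGetD_natCast, List.getD_eq_getElem?_getD, hx]
  rfl

-- phase 1 of B computes (pvK n, pvD n)
lemma ph1_run (weight : List Int) (W : Int) (n : Nat) :
    ∀ m j : Nat, m + j = n →
      (PySem.List.pyRange (m : Int) 0 (-1)).foldl (pvPh1Step weight)
        (pvK weight W n j, pvD weight W n j) = (pvK weight W n n, pvD weight W n n) := by
  intro m
  induction m with
  | zero =>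
    intro j h
    have hj : j = n := by omega
    subst hj
    rw [show ((0 : Nat) : Int) = (0 : Int) from rfl,
      PySem.List.pyRange_neg_one_eq_nil (le_refl (0 : Int))]
    rfl
  | succ m ih =>
    intro j h
    have hcast : (((m + 1 : Nat)) : Int) = (m : Int) + 1 := by push_cast; ring
    rw [hcast, PySem.List.pyRange_neg_one_cons (by omega), List.foldl_cons,
      show (m : Int) + 1 - 1 = (m : Int) from by ring]
    have hstep : pvPh1Step weight (pvK weight W n j, pvD weight W n j) ((m : Int) + 1) =
        (pvK weight W n (j + 1), pvD weight W n (j + 1)) := by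
      unfold pvPh1Step
      dsimp only
      rw [show (m : Int) + 1 - 1 = (n : Int) - (j : Int) - 1 from by omega]
      show (PySem.Set.union (pvK weight W n j) (pvNewOf weight n j (pvK weight W n j)),
        pvD weight W n j ++ [pvNewOf weight n j (pvK weight W n j)]) = _
      rfl
    rw [hstep]
    exact ih (j + 1) (by omega)

-- dict built by inserting F w at every w of a list
lemma get?_foldl_insertF (F : Int → Int × Int) :
    ∀ (l : List Int) (d : PySem.Dict Int (Int × Int)) (x : Int),
      (l.foldl (fun d w => d.insert w (F w)) d).get? x =
        if x ∈ l then some (F x) else d.get? x := by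
  intro l
  induction l with
  | nil => intro d x; simp
  | cons a l ih =>
    intro d x
    rw [List.foldl_cons, ih]
    by_cases hx : x ∈ l
    · rw [if_pos hx, if_pos (List.mem_cons_of_mem _ hx)]
    · rw [if_neg hx, PySem.Dict.get?_insert]
      by_cases hxa : x = a
      · subst hxa
        rw [if_pos rfl, if_pos List.mem_cons_self]
      · rw [if_neg hxa, if_neg (by simp [List.mem_cons, hxa, hx])]

-- phase 2 invariant, carried through the item loop
lemma ph2_run (weight value : List Int) (W : Int) (n : Nat) (hn : n = weight.length) :
    ∀ i : Nat, i ≤ n →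
      (∀ w : Int, w ∈ ((List.range i).foldl
          (fun st (k : Nat) => pvPh2Step weight value (pvD weight W n n) (n : Int) st (1 + (k : Int)))
          (pvK weight W n n,
            (pvK weight W n n).foldl (fun d w => d.insert w ((0 : Int), (1 : Int))) PySem.Dict.empty)).1
        ↔ w ∈ pvK weight W n (n - i)) ∧
      (∀ w : Int, w ∈ pvK weight W n (n - i) →
        ((List.range i).foldl
          (fun st (k : Nat) => pvPh2Step weight value (pvD weight W n n) (n : Int) st (1 + (k : Int)))
          (pvK weight W n n,
            (pvK weight W n n).foldl (fun d w => d.insert w ((0 : Int), (1 : Int))) PySem.Dict.empty)).2.get? w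
          = some (pvG weight value i w)) := by
  intro i
  induction i with
  | zero =>
    intro _
    constructor
    · intro w
      simp only [List.range_zero, List.foldl_nil, Nat.sub_zero]
    · intro w hw'
      rw [Nat.sub_zero] at hw'
      simp only [List.range_zero, List.foldl_nil, get?_foldl_insertF]
      rw [if_pos hw']
      rfl
  | succ i ih =>
    intro hle
    obtain ⟨hmem, htab⟩ := ih (by omega)
    simp only [List.range_succ, List.foldl_append, List.foldl_cons, List.foldl_nil]
    set S := (List.range i).foldl
        (fun st (k : Nat) => pvPh2Step weight value (pvD weight W n n) (n : Int) st (1 + (k : Int)))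
        (pvK weight W n n,
          (pvK weight W n n).foldl (fun d w => d.insert w ((0 : Int), (1 : Int))) PySem.Dict.empty) with hS
    have hidx : (n : Int) - (1 + (i : Int)) = ((n - i - 1 : Nat) : Int) := by omega
    have harg : 1 + (i : Int) - 1 = ((i : Nat) : Int) := by omega
    have hj : n - i - 1 + 1 = n - i := by omega
    have hsub : n - (i + 1) = n - i - 1 := by omega
    unfold pvPh2Step
    dsimp only
    rw [hidx, pvD_get weight W n n (n - i - 1) (by omega), harg]
    have hcur : ∀ w : Int,
        w ∈ PySem.Set.diff S.1 (pvNew weight W n (n - i - 1)) ↔ w ∈ pvK weight W n (n - (i + 1)) := by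
      intro w
      rw [PySem.Set.mem_diff, hsub]
      have h2 := pvK_diff_mem weight W n (n - i - 1) w
      rw [hj] at h2
      constructor
      · rintro ⟨ha, hb⟩
        exact h2.mp ⟨(hmem w).mp ha, hb⟩
      · intro ha
        obtain ⟨ha', hb'⟩ := h2.mpr ha
        exact ⟨(hmem w).mpr ha', hb'⟩
    refine ⟨hcur, ?_⟩
    intro w hw'
    simp only [get?_foldl_insertF]
    rw [if_pos ((hcur w).mpr hw')]
    congr 1
    have hwlow : w ∈ pvK weight W n (n - i - 1) := by rwa [hsub] at hw'
    have hwK : w ∈ pvK weight W n (n - i) := by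
      have := pvK_mono weight W n (n - i - 1) w hwlow
      rwa [hj] at this
    have hskip : S.2.getD w ((0 : Int), (0 : Int)) = pvG weight value i w := by
      rw [PySem.Dict.getD_eq_get?_getD, htab w hwK]
      rfl
    unfold pvCell
    dsimp only
    rw [hskip]
    by_cases hwle : PySem.List.pyGetD weight (i : Int) 0 ≤ w
    · rw [if_pos hwle]
      have hW1 : pvW1 weight n (n - i - 1) = PySem.List.pyGetD weight (i : Int) 0 := by
        unfold pvW1
        congr 1
        omega
      have hshift : w - PySem.List.pyGetD weight (i : Int) 0 ∈ pvK weight W n (n - i) := by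
        have := pvK_shift weight W n (n - i - 1) w hwlow (by rw [hW1]; exact hwle)
        rwa [hj, hW1] at this
      have ht : S.2.getD (w - PySem.List.pyGetD weight (i : Int) 0) ((0 : Int), (0 : Int))
          = pvG weight value i (w - PySem.List.pyGetD weight (i : Int) 0) := by
        rw [PySem.Dict.getD_eq_get?_getD, htab _ hshift]
        rfl
      rw [ht]
      conv_rhs => rw [pvG]
      dsimp only
      rw [if_pos hwle]
    · rw [if_neg hwle]
      conv_rhs => rw [pvG]
      dsimp only
      rw [if_neg hwle]

lemma B_eq_G (weight value : List Int) (W : Int) :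
    zeroOnePackMaxProfitNumbers2_alt weight value W = (pvG weight value weight.length W).2 := by
  unfold zeroOnePackMaxProfitNumbers2_alt
  dsimp only
  rw [show (PySem.Set.ofList [W], ([] : List (PySem.Set Int)))
        = (pvK weight W weight.length 0, pvD weight W weight.length 0) from rfl,
    ph1_run weight W weight.length weight.length 0 (by omega)]
  dsimp only
  rw [PySem.List.pyRange_one 1 ((weight.length : Int) + 1)]
  simp only [add_sub_cancel_right, Int.toNat_natCast, List.foldl_map]
  have h := (ph2_run weight value W weight.length rfl weight.length (le_refl _)).2 W
    (by show W ∈ pvK weight W weight.length (weight.length - weight.length)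
        rw [Nat.sub_self]
        show W ∈ PySem.Set.ofList [W]
        rw [PySem.Set.mem_ofList]
        exact List.mem_singleton.mpr rfl)
  rw [PySem.Dict.getD_eq_get?_getD, h]
  rfl

-- ===== VERDICT (by name: the statement is the Claim_ definition above) =====
theorem zeroOnePackMaxProfitNumbers2_spec : Claim_equal_zeroOnePackMaxProfitNumbers2 := by
  intro weight value W _hdom hpre
  obtain ⟨hW, hw, _hval⟩ := hpre
  unfold Spec_zeroOnePackMaxProfitNumbers2
  rw [A_eq_G weight value W hW hw, B_eq_G]
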